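-- pv_equiv track=rewrite | github.com/paulklemstine/factor | v18_millennium_moonshots.py | generate_tree
-- ===== SOURCE A (Python) =====
-- def generate_tree(max_depth):
--     """Generate all (m,n) pairs up to given depth via Berggren matrices."""
--     nodes = {0: [(2, 1)]}
--     for d in range(1, max_depth + 1):
--         nodes[d] = []
--         for m, n in nodes[d-1]:
--             nodes[d].append((2*m - n, m))   # B1
--             nodes[d].append((2*m + n, m))   # B2
--             nodes[d].append((m + 2*n, n))   # B3
--     return nodes
-- ===== SOURCE B (Python) =====
-- def generate_tree(max_depth):
--     """Generate all (m,n) pairs up to given depth via Berggren matrices."""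
--     def levels(m, n, d):
--         # per-depth levels of the subtree rooted at (m, n) sitting at depth d
--         if d >= max_depth:
--             return [[(m, n)]]
--         l1 = levels(2 * m - n, m, d + 1)   # B1
--         l2 = levels(2 * m + n, m, d + 1)   # B2
--         l3 = levels(m + 2 * n, n, d + 1)   # B3
--         return [[(m, n)]] + [a + b + c for a, b, c in zip(l1, l2, l3)]
--     return dict(enumerate(levels(2, 1, 0)))
-- ===== Notes on version B (the rewrite author's own statement) =====
-- stated objective: alternative
-- what changed: Replaces the iterative level-by-level dict DP with a recursive divide-and-merge over the Berggren tree: a helper returns the per-depth level lists of each subtree and sibling results are merged depth-wise with zip, the dict being assembled once at the end from enumerate.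
import Mathlib
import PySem

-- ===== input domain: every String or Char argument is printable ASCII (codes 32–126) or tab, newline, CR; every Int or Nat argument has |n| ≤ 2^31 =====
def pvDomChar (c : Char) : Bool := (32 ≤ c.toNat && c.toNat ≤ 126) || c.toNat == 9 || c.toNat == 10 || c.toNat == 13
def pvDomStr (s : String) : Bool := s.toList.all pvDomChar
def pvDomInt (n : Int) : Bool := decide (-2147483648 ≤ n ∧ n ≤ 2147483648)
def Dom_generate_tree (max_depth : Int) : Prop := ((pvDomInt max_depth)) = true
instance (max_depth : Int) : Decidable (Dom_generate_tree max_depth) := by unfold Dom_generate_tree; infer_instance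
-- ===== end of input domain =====

-- B replaces A's iterative level-by-level dict DP by a recursive divide-and-merge over the
-- Berggren tree (per-subtree level lists merged depth-wise); same asymptotic cost (objective: alternative).

-- ===== PORT A =====
def generate_tree (max_depth : Int) : List (Int × List (Int × Int)) :=
  let nodes : PySem.Dict Int (List (Int × Int)) := PySem.Dict.ofList [(0, [(2, 1)])]
  let nodes := (PySem.List.pyRange 1 (max_depth + 1) 1).foldl (fun nodes d =>
    let nodes := nodes.insert d []
    -- nodes[d-1]: the key d-1 is always present here, so getD with default [] is exact
    (nodes.getD (d - 1) []).foldl (fun nodes mn =>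
      let nodes := nodes.modify d [] (· ++ [(2 * mn.1 - mn.2, mn.1)])   -- B1
      let nodes := nodes.modify d [] (· ++ [(2 * mn.1 + mn.2, mn.1)])   -- B2
      nodes.modify d [] (· ++ [(mn.1 + 2 * mn.2, mn.2)])) nodes)        -- B3
    nodes
  nodes.items

-- ===== PORT B =====
-- [a + b + c for a, b, c in zip(l1, l2, l3)]
def pvZip3Cat : List (List (Int × Int)) → List (List (Int × Int)) → List (List (Int × Int)) → List (List (Int × Int))
  | a :: as_, b :: bs, c :: cs => (a ++ b ++ c) :: pvZip3Cat as_ bs cs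
  | _, _, _ => []

def pvLevels (max_depth : Int) (m n d : Int) : List (List (Int × Int)) :=
  if d ≥ max_depth then [[(m, n)]]
  else
    let l1 := pvLevels max_depth (2 * m - n) m (d + 1)   -- B1
    let l2 := pvLevels max_depth (2 * m + n) m (d + 1)   -- B2
    let l3 := pvLevels max_depth (m + 2 * n) n (d + 1)   -- B3
    [[(m, n)]] ++ pvZip3Cat l1 l2 l3
termination_by (max_depth - d).toNat
decreasing_by all_goals omega

def generate_tree_alt (max_depth : Int) : List (Int × List (Int × Int)) :=
  -- dict(enumerate(levels)): enumerate yields strictly increasing, hence distinct, keys,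
  -- so the resulting dict's items are exactly these pairs in this order (exact)
  PySem.List.enumerate (pvLevels max_depth 2 1 0) 0

-- ===== PRECONDITION & SPEC =====
def Spec_generate_tree (max_depth : Int) (out : List (Int × List (Int × Int))) : Prop := out = generate_tree_alt max_depth
instance (max_depth : Int) (out : List (Int × List (Int × Int))) : Decidable (Spec_generate_tree max_depth out) := by unfold Spec_generate_tree; infer_instance

-- ===== CLAIM (what is proved, stated in full; the proofs are below) =====
def Claim_equal_generate_tree : Prop := ∀ (max_depth : Int), Dom_generate_tree max_depth → Spec_generate_tree max_depth (generate_tree max_depth)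

-- ===== LEMMAS AND PROOFS =====

/-- One application of the three Berggren matrices to a whole level. -/
def pvStep (s : List (Int × Int)) : List (Int × Int) :=
  s.flatMap (fun p => [(2 * p.1 - p.2, p.1), (2 * p.1 + p.2, p.1), (p.1 + 2 * p.2, p.2)])

def pvIter : Nat → List (Int × Int) → List (Int × Int)
  | 0, s => s
  | k + 1, s => pvStep (pvIter k s)

theorem pvStep_append (a b : List (Int × Int)) : pvStep (a ++ b) = pvStep a ++ pvStep b := by
  simp [pvStep]

theorem pvIter_append (k : Nat) (a b : List (Int × Int)) :
    pvIter k (a ++ b) = pvIter k a ++ pvIter k b := by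
  induction k with
  | zero => rfl
  | succ k ih => simp [pvIter, ih, pvStep_append]

theorem pvIter_step (k : Nat) (s : List (Int × Int)) :
    pvIter k (pvStep s) = pvIter (k + 1) s := by
  induction k generalizing s with
  | zero => rfl
  | succ k ih => simp [pvIter] at *; rw [ih]

theorem pvZip3Cat_map (l : List Nat) (f1 f2 f3 : Nat → List (Int × Int)) :
    pvZip3Cat (l.map f1) (l.map f2) (l.map f3) = l.map (fun k => f1 k ++ f2 k ++ f3 k) := by
  induction l with
  | nil => rfl
  | cons x xs ih => simp [pvZip3Cat, ih]

theorem pvLevels_eq (max_depth m n d : Int) :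
    pvLevels max_depth m n d =
      (List.range ((max_depth - d).toNat + 1)).map (fun k => pvIter k [(m, n)]) := by
  fun_induction pvLevels max_depth m n d with
  | case1 m n d h =>
    have : (max_depth - d).toNat = 0 := by omega
    simp [this, pvIter]
  | case2 m n d h l1 l2 l3 ih1 ih2 ih3 =>
    have hf : (max_depth - d).toNat = (max_depth - (d + 1)).toNat + 1 := by omega
    simp only [l1, l2, l3]
    rw [ih1, ih2, ih3, pvZip3Cat_map, hf,
      List.range_succ_eq_map (n := (max_depth - (d + 1)).toNat + 1), List.map_cons, List.map_map]
    have hmap : ∀ k : Nat,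
        pvIter k [(2 * m - n, m)] ++ pvIter k [(2 * m + n, m)] ++ pvIter k [(m + 2 * n, n)]
          = ((fun k => pvIter k [(m, n)]) ∘ Nat.succ) k := by
      intro k
      simp only [Function.comp_apply]
      rw [List.append_assoc, ← pvIter_append, ← pvIter_append]
      have hstep : ([(2 * m - n, m)] ++ ([(2 * m + n, m)] ++ [(m + 2 * n, n)]) : List (Int × Int))
          = pvStep [(m, n)] := by simp [pvStep]
      rw [hstep, pvIter_step]
    simp only [List.singleton_append]
    congr 1
    exact List.map_congr_left (fun k _ => hmap k)

theorem pvEnum_map_range {α : Type} (f : Nat → α) (nn : Nat) (s : Int) :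
    PySem.List.enumerate ((List.range nn).map f) s
      = (List.range nn).map (fun k : Nat => ((s + k : Int), f k)) := by
  induction nn with
  | zero => rfl
  | succ k ih =>
    rw [List.range_succ, List.map_append, PySem.List.enumerate_append, ih]
    simp [PySem.List.enumerate]

theorem pvB_eq (max_depth : Int) :
    generate_tree_alt max_depth
      = (List.range (max_depth.toNat + 1)).map (fun k : Nat => ((k : Int), pvIter k [(2, 1)])) := by
  rw [generate_tree_alt, pvLevels_eq, pvEnum_map_range]
  have : (max_depth - 0).toNat = max_depth.toNat := by omega
  rw [this]
  simp

/-- `modify` at the (fresh) last key of a dict only rewrites that last entry. -/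
theorem pvModify_last (L : List (Int × List (Int × Int))) (d : Int)
    (acc : List (Int × Int)) (f : List (Int × Int) → List (Int × Int))
    (h : ∀ p ∈ L, p.1 ≠ d) :
    (PySem.Dict.mk (L ++ [(d, acc)])).modify d [] f = PySem.Dict.mk (L ++ [(d, f acc)]) := by
  have hfind : (L ++ [(d, acc)]).find? (fun p => p.1 == d) = some (d, acc) := by
    rw [List.find?_append]
    have : L.find? (fun p => p.1 == d) = none := by
      rw [List.find?_eq_none]
      intro p hp
      simpa using h p hp
    simp [this]
  have hget : (PySem.Dict.mk (L ++ [(d, acc)])).getD d [] = acc := by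
    simp [PySem.Dict.getD, PySem.Dict.get?, hfind]
  have hcon : (PySem.Dict.mk (L ++ [(d, acc)])).contains d = true := by
    simp [PySem.Dict.contains]
  rw [PySem.Dict.modify, hget]
  apply PySem.Dict.ext
  rw [PySem.Dict.items_insert_of_contains _ _ hcon]
  simp only [List.map_append]
  congr 1
  · apply List.map_congr_left ?_ |>.trans (List.map_id L)
    intro p hp
    simp [h p hp]
  · simp

/-- The inner `for m, n in nodes[d-1]` loop appends `pvStep lvl` to the last bucket. -/
theorem pvInnerA (d : Int) (lvl : List (Int × Int)) :
    ∀ (L : List (Int × List (Int × Int))) (acc : List (Int × Int)), (∀ p ∈ L, p.1 ≠ d) →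
    lvl.foldl (fun nodes mn =>
      let nodes := nodes.modify d [] (· ++ [(2 * mn.1 - mn.2, mn.1)])
      let nodes := nodes.modify d [] (· ++ [(2 * mn.1 + mn.2, mn.1)])
      nodes.modify d [] (· ++ [(mn.1 + 2 * mn.2, mn.2)])) (PySem.Dict.mk (L ++ [(d, acc)]))
      = PySem.Dict.mk (L ++ [(d, acc ++ pvStep lvl)]) := by
  induction lvl with
  | nil => intro L acc h; simp [pvStep]
  | cons mn tl ih =>
    intro L acc h
    simp only [List.foldl_cons]
    rw [pvModify_last L d acc _ h, pvModify_last L d _ _ h, pvModify_last L d _ _ h, ih L _ h]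
    simp [pvStep]

theorem pvOuterA (j : Nat) :
    (PySem.List.pyRange 1 ((j : Int) + 1) 1).foldl (fun nodes d =>
      let nodes := nodes.insert d []
      (nodes.getD (d - 1) []).foldl (fun nodes mn =>
        let nodes := nodes.modify d [] (· ++ [(2 * mn.1 - mn.2, mn.1)])
        let nodes := nodes.modify d [] (· ++ [(2 * mn.1 + mn.2, mn.1)])
        nodes.modify d [] (· ++ [(mn.1 + 2 * mn.2, mn.2)])) nodes)
      (PySem.Dict.ofList [(0, [(2, 1)])])
      = PySem.Dict.mk ((List.range (j + 1)).map (fun k : Nat => ((k : Int), pvIter k [(2, 1)]))) := by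
  induction j with
  | zero =>
    rw [PySem.List.pyRange_one_eq_nil (by omega)]
    decide
  | succ j ih =>
    have hc : (((j + 1 : Nat)) : Int) + 1 = ((j : Int) + 1) + 1 := by push_cast; ring
    rw [hc, PySem.List.pyRange_one_succ_right (by omega), List.foldl_append, ih]
    simp only [List.foldl_cons, List.foldl_nil]
    set L := (List.range (j + 1)).map (fun k : Nat => ((k : Int), pvIter k [(2, 1)])) with hL
    have hfresh : ∀ p ∈ L, p.1 ≠ ((j : Int) + 1) := by
      intro p hp
      rw [hL] at hp
      obtain ⟨k, hk, rfl⟩ := List.mem_map.mp hp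
      have := List.mem_range.mp hk
      simp only []
      omega
    have hcon : (PySem.Dict.mk L).contains ((j : Int) + 1) = false := by
      simp only [PySem.Dict.contains, List.any_eq_false]
      intro p hp
      simpa using hfresh p hp
    have hins : (PySem.Dict.mk L).insert ((j : Int) + 1) [] = PySem.Dict.mk (L ++ [((j : Int) + 1, [])]) := by
      apply PySem.Dict.ext
      rw [PySem.Dict.items_insert_of_not_contains _ _ hcon]
    have hgetD : (PySem.Dict.mk (L ++ [((j : Int) + 1, [])])).getD ((j : Int) + 1 - 1) [] = pvIter j [(2, 1)] := by
      have hpred : (fun p : Int × List (Int × Int) => p.1 == (j : Int) + 1 - 1)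
          = (fun p : Int × List (Int × Int) => p.1 == (j : Int)) := by
        funext p; simp only [add_sub_cancel_right]
      have hr : (List.range (j + 1)).find?
          ((fun p : Int × List (Int × Int) => p.1 == (j : Int)) ∘ (fun k : Nat => ((k : Int), pvIter k [(2, 1)]))) = some j := by
        rw [List.range_succ, List.find?_append]
        have h1 : (List.range j).find?
            ((fun p : Int × List (Int × Int) => p.1 == (j : Int)) ∘ (fun k : Nat => ((k : Int), pvIter k [(2, 1)]))) = none := by
          rw [List.find?_eq_none]
          intro k hk
          have := List.mem_range.mp hk
          simp only [Function.comp, beq_iff_eq]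
          omega
        simp [h1, Function.comp]
      have hfindL : L.find? (fun p => p.1 == (j : Int)) = some ((j : Int), pvIter j [(2, 1)]) := by
        rw [hL, List.find?_map, hr]
        rfl
      have hfind : (L ++ [((j : Int) + 1, [])]).find? (fun p => p.1 == (j : Int) + 1 - 1)
          = some ((j : Int), pvIter j [(2, 1)]) := by
        rw [hpred, List.find?_append, hfindL]
        rfl
      show (Option.map (fun x : Int × List (Int × Int) => x.2)
          ((L ++ [((j : Int) + 1, [])]).find? (fun p : Int × List (Int × Int) => p.1 == (j : Int) + 1 - 1))).getD [] = _
      rw [hfind]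
      rfl

    rw [hins]
    simp only [hgetD]
    rw [pvInnerA _ _ L [] hfresh]
    congr 1
    rw [hL, List.range_succ (n := j + 1)]
    simp [pvIter]

theorem pvA_eq (max_depth : Int) :
    generate_tree max_depth
      = (List.range (max_depth.toNat + 1)).map (fun k : Nat => ((k : Int), pvIter k [(2, 1)])) := by
  rw [generate_tree]
  by_cases hmd : 0 ≤ max_depth
  · have : max_depth + 1 = ((max_depth.toNat : Int)) + 1 := by omega
    rw [this]
    simp only []
    rw [pvOuterA max_depth.toNat]
  · have h0 : max_depth.toNat = 0 := by omega
    rw [h0, PySem.List.pyRange_one_eq_nil (by omega)]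
    decide

-- ===== VERDICT (by name: the statement is the Claim_ definition above) =====
theorem generate_tree_spec : Claim_equal_generate_tree := by
  intro max_depth _
  unfold Spec_generate_tree
  rw [pvA_eq, pvB_eq]
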